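-- pv_equiv track=rewrite | github.com/akashdeep3194/Scaler | test/Codeforces Round #759 (Div. 2, based on Technocup 2022 Elimination Round 3)/B. Array Eversion.py | solve
-- ===== SOURCE A (Python) =====
-- def solve(arr):
--     mx = max(arr)
--     ans = 1
--     i = 0
--     last = arr[-1]
--     if arr[-1] == mx:
--         return 0
--     for i in range(len(arr)-1,-1,-1):
--         if arr[i] == mx:
--             return ans
--
--         if arr[i]>last:
--             ans += 1
--             last = arr[i]
--     return ans
-- ===== SOURCE B (Python) =====
-- def solve(arr):
--     # left-to-right monotonic stack: the stack ends up holding exactly the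
--     # "leaders" (elements strictly greater than everything to their right);
--     # the answer is their count minus one.
--     stack = []
--     for x in arr:
--         while stack and stack[-1] <= x:
--             stack.pop()
--         stack.append(x)
--     return len(stack) - 1
-- ===== Notes on version B (the rewrite author's own statement) =====
-- stated objective: alternative
-- what changed: B replaces A's right-to-left running-max scan (with max() precompute and early returns) by a left-to-right monotonic stack that keeps exactly the array's leaders and returns the stack size minus one.
-- outside the precondition, e.g. on solve([]): A raises ValueError, B returns -1
import Mathlib
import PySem

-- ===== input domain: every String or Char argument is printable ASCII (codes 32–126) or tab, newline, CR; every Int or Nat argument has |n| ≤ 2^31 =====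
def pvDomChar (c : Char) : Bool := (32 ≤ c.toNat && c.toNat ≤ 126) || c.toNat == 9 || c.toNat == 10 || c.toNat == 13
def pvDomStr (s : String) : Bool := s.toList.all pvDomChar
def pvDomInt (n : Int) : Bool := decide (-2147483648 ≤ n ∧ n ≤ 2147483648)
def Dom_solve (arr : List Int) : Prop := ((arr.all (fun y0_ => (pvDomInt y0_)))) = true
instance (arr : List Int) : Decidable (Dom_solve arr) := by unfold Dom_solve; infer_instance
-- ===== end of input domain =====

-- B computes the answer with a left-to-right monotonic stack of the array's leaders
-- instead of A's right-to-left running-max scan (objective: alternative).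


-- ===== PORT A =====
-- A's `for i in range(len(arr)-1,-1,-1)` loop with its two early returns,
-- carried over the index list with state (ans, last).
def solveLoop (arr : List Int) (mx : Int) : List Int → Int → Int → Int
  | [], ans, _ => ans
  | i :: rest, ans, last =>
    let x := PySem.List.pyGetD arr i 0  -- arr[i]; every i the loop visits is in range
    if x == mx then ans
    else if x > last then solveLoop arr mx rest (ans + 1) x
    else solveLoop arr mx rest ans last

def solve (arr : List Int) : Int :=
  match PySem.List.max? arr (fun y => y) with
  | none => 0  -- max([]) raises ValueError; excluded by Pre_solve
  | some mx =>
    match PySem.List.pyGet? arr (-1) with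
    | none => 0  -- unreachable: arr nonempty here
    | some last =>
      if last == mx then 0
      else solveLoop arr mx (PySem.List.pyRange ((arr.length : Int) - 1) (-1) (-1)) 1 last

-- ===== PORT B =====
-- `while stack and stack[-1] <= x: stack.pop()` (stack top = list end);
-- stack[-1] is read with getLastD 0 — the stack is nonempty in that branch, so the default is never used
def popLe : List Int → Int → List Int
  | [], _ => []
  | a :: t, x =>
    if (a :: t).getLastD 0 ≤ x then popLe ((a :: t).dropLast) x else a :: t
termination_by s _ => s.length
decreasing_by simp

-- one iteration of B's for loop: pop, then append x
def stepB (s : List Int) (x : Int) : List Int := popLe s x ++ [x]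

def solve_alt (arr : List Int) : Int :=
  ((arr.foldl stepB []).length : Int) - 1

-- ===== PRECONDITION & SPEC =====
-- Pre_ excludes only the empty list, on which A raises ValueError (max([])).
def Pre_solve (arr : List Int) : Prop := arr ≠ []
instance (arr : List Int) : Decidable (Pre_solve arr) := by unfold Pre_solve; infer_instance
def pvWitness_solve : List Int := [2, 1, 3]

def Spec_solve (arr : List Int) (out : Int) : Prop := out = solve_alt arr
instance (arr : List Int) (out : Int) : Decidable (Spec_solve arr out) := by unfold Spec_solve; infer_instance

-- ===== CLAIM (what is proved, stated in full; the proofs are below) =====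
def Claim_equal_solve : Prop := ∀ (arr : List Int), Dom_solve arr → Pre_solve arr → Spec_solve arr (solve arr)

-- ===== LEMMAS AND PROOFS =====

-- number of strict records of the running maximum over r, starting from current max m
def rcount : List Int → Int → Nat
  | [], _ => 0
  | x :: t, m => if m < x then 1 + rcount t x else rcount t m

-- the record values themselves
def recs : List Int → Int → List Int
  | [], _ => []
  | x :: t, m => if m < x then x :: recs t x else recs t m

theorem recs_length (r : List Int) (m : Int) : (recs r m).length = rcount r m := by
  induction r generalizing m with
  | nil => rfl
  | cons x t ih =>
    by_cases h : m < x
    · simp [recs, rcount, if_pos h, ih]; omega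
    · simp [recs, rcount, if_neg h, ih]

theorem rcount_zero (t : List Int) (m : Int) (h : ∀ y ∈ t, y ≤ m) : rcount t m = 0 := by
  induction t generalizing m with
  | nil => rfl
  | cons x t ih =>
    have hx : x ≤ m := h x (by simp)
    simp only [rcount, if_neg (by omega : ¬ m < x)]
    exact ih m (fun y hy => h y (by simp [hy]))

-- ---- B side ----
-- one unfolding of the pop loop at the stack's top (= list end)
theorem popLe_concat (l : List Int) (y x : Int) :
    popLe (l ++ [y]) x = if y ≤ x then popLe l x else l ++ [y] := by
  cases l with
  | nil => simp [popLe]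
  | cons b l' =>
    rw [List.cons_append, popLe,
      ← List.cons_append, List.getLastD_concat, List.dropLast_concat]

-- popLe, through the reversed (top-at-head) view, is dropWhile
theorem popLe_reverse (x : Int) (r : List Int) :
    popLe r.reverse x = (r.dropWhile (fun y => decide (y ≤ x))).reverse := by
  induction r with
  | nil => simp [popLe]
  | cons y r' ih =>
    rw [List.reverse_cons, popLe_concat, List.dropWhile_cons]
    by_cases h : y ≤ x
    · rw [if_pos h, ih, if_pos (by simpa using h)]
    · rw [if_neg h, if_neg (by simpa using h)]; simp

-- head-at-top version of one loop iteration
def stepH (s : List Int) (x : Int) : List Int := x :: s.dropWhile (fun y => decide (y ≤ x))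

theorem foldl_stepB_reverse (l : List Int) (s : List Int) :
    (l.foldl stepB s).reverse = l.foldl stepH s.reverse := by
  induction l generalizing s with
  | nil => simp
  | cons x t ih =>
    rw [List.foldl_cons, List.foldl_cons, ih]
    congr 1
    show (stepB s x).reverse = stepH s.reverse x
    rw [stepB, stepH, List.reverse_append]
    have := popLe_reverse x s.reverse
    rw [List.reverse_reverse] at this
    rw [this, List.reverse_reverse]
    rfl

theorem dropWhile_recs (u : List Int) (m x : Int) (hmx : m ≤ x) :
    (recs u m).dropWhile (fun y => decide (y ≤ x)) = recs u x := by
  induction u generalizing m with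
  | nil => simp [recs]
  | cons z w ih =>
    by_cases h1 : m < z
    · rw [recs, if_pos h1]
      by_cases h2 : z ≤ x
      · rw [List.dropWhile_cons, if_pos (by simpa using h2), ih z h2, recs,
          if_neg (by omega : ¬ x < z)]
      · rw [List.dropWhile_cons, if_neg (by simpa using h2), recs,
          if_pos (by omega : x < z)]
    · rw [recs, if_neg h1, ih m hmx, recs, if_neg (by omega : ¬ x < z)]

-- the stack built over (a :: t).reverse is exactly the records of a :: t
theorem stepH_recs (t : List Int) (a : Int) :
    ((a :: t).reverse).foldl stepH [] = a :: recs t a := by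
  induction t generalizing a with
  | nil => simp [stepH, recs]
  | cons b u ih =>
    rw [show (a :: b :: u).reverse = (b :: u).reverse ++ [a] by simp,
      List.foldl_append, ih b, List.foldl_cons, List.foldl_nil, stepH]
    by_cases h : b ≤ a
    · rw [List.dropWhile_cons, if_pos (by simpa using h), dropWhile_recs u b a h]
      simp only [recs]
      rw [if_neg (by omega : ¬ a < b)]
    · rw [List.dropWhile_cons, if_neg (by simpa using h)]
      simp only [recs]
      rw [if_pos (by omega : a < b)]

theorem solve_alt_eq (a0 : Int) (rest : List Int) (arr : List Int)
    (hrev : arr.reverse = a0 :: rest) :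
    solve_alt arr = (rcount rest a0 : Int) := by
  have h1 : (arr.foldl stepB []).length = (arr.foldl stepH ([] : List Int)).length := by
    have := congrArg List.length (foldl_stepB_reverse arr [])
    simpa using this
  have h2 : arr.foldl stepH [] = a0 :: recs rest a0 := by
    have := stepH_recs rest a0
    rw [← hrev, List.reverse_reverse] at this
    exact this
  rw [solve_alt, h1, h2]
  simp [recs_length]

-- ---- A side ----
-- the same loop, walking the reversed element list directly
def loopRev (mx : Int) : List Int → Int → Int → Int
  | [], ans, _ => ans
  | x :: t, ans, last =>
    if x == mx then ans
    else if x > last then loopRev mx t (ans + 1) x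
    else loopRev mx t ans last

theorem solveLoop_eq_loopRev (arr : List Int) (mx : Int) (k : Nat) (hk : k ≤ arr.length)
    (ans last : Int) :
    solveLoop arr mx (PySem.List.pyRange ((k : Int) - 1) (-1) (-1)) ans last
      = loopRev mx ((arr.take k).reverse) ans last := by
  induction k generalizing ans last with
  | zero =>
    rw [PySem.List.pyRange_neg_one_eq_nil (by omega)]
    simp [solveLoop, loopRev]
  | succ k ih =>
    have hklt : k < arr.length := by omega
    have hc : (((k + 1 : Nat) : Int)) - 1 = (k : Int) := by push_cast; ring
    rw [hc, PySem.List.pyRange_neg_one_cons (by omega : (-1 : Int) < (k : Int))]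
    have htake : (arr.take (k + 1)).reverse = arr[k] :: (arr.take k).reverse := by
      rw [List.take_add_one, List.getElem?_eq_getElem hklt]
      simp
    have hget : PySem.List.pyGetD arr ((k : Nat) : Int) 0 = arr[k] := by
      simp [PySem.List.pyGetD_natCast, List.getD_eq_getElem?_getD,
        List.getElem?_eq_getElem hklt]
    by_cases h1 : arr[k] = mx
    · simp [solveLoop, hget, htake, loopRev, h1]
    · have hb : (arr[k] == mx) = false := by simp [h1]
      by_cases h2 : arr[k] > last
      · simp only [solveLoop, hget, htake, loopRev, hb, Bool.false_eq_true, if_false, if_pos h2]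
        exact ih (by omega) (ans + 1) arr[k]
      · simp only [solveLoop, hget, htake, loopRev, hb, Bool.false_eq_true, if_false, if_neg h2]
        exact ih (by omega) ans last

theorem loopRev_eq (mx : Int) (r : List Int) (ans last : Int)
    (hlt : last < mx) (hmem : mx ∈ r) (hub : ∀ y ∈ r, y ≤ mx) :
    loopRev mx r ans last = ans + (rcount r last : Int) - 1 := by
  induction r generalizing ans last with
  | nil => simp at hmem
  | cons x t ih =>
    by_cases hx : x = mx
    · subst hx
      have : rcount t x = 0 := rcount_zero t x (fun y hy => hub y (by simp [hy]))
      simp [loopRev, rcount, hlt, this]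
    · have hxlt : x < mx := lt_of_le_of_ne (hub x (by simp)) hx
      have hmem' : mx ∈ t := by
        rcases List.mem_cons.mp hmem with h | h
        · exact absurd h.symm hx
        · exact h
      have hub' : ∀ y ∈ t, y ≤ mx := fun y hy => hub y (by simp [hy])
      by_cases h2 : x > last
      · simp only [loopRev, beq_iff_eq, if_neg hx, rcount, if_pos h2]
        rw [ih (ans + 1) x hxlt hmem' hub']
        push_cast; ring
      · simp only [loopRev, beq_iff_eq, if_neg hx, if_neg h2, rcount]
        exact ih ans last hlt hmem' hub'

theorem solve_eq (a0 : Int) (rest : List Int) (arr : List Int)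
    (hrev : arr.reverse = a0 :: rest) :
    solve arr = (rcount rest a0 : Int) := by
  have hne : arr ≠ [] := by intro h; rw [h] at hrev; simp at hrev
  obtain ⟨x, t, hx⟩ : ∃ x t, arr = x :: t := by
    cases arr with
    | nil => exact absurd rfl hne
    | cons x t => exact ⟨x, t, rfl⟩
  have hmax : PySem.List.max? arr (fun y => y) = some (t.foldl max x) := by
    rw [hx, PySem.List.max?_id_cons]
  set mx := t.foldl max x with hmx
  have hub : ∀ y ∈ arr, y ≤ mx := PySem.List.max?_isMax hmax
  have hmem : mx ∈ arr := PySem.List.max?_mem hmax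
  have ha0mem : a0 ∈ arr := by
    rw [← List.mem_reverse, hrev]; simp
  have hlast2 : arr.getLast? = some a0 := by
    rw [← List.head?_reverse, hrev]; rfl
  simp only [solve, hmax, PySem.List.pyGet?_neg_one, hlast2]
  by_cases heq : a0 = mx
  · have hz : rcount rest a0 = 0 := by
      apply rcount_zero
      intro y hy
      have : y ∈ arr := by rw [← List.mem_reverse, hrev]; simp [hy]
      rw [heq]; exact hub y this
    rw [heq] at hz
    simp [heq, hz]
  · simp only [beq_iff_eq, if_neg heq]
    rw [solveLoop_eq_loopRev arr mx arr.length (le_refl _) 1 a0]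
    rw [List.take_length, hrev]
    have ha0lt : a0 < mx := lt_of_le_of_ne (hub a0 ha0mem) heq
    have hmemrev : mx ∈ a0 :: rest := by rw [← hrev, List.mem_reverse]; exact hmem
    have hmemrest : mx ∈ rest := by
      rcases List.mem_cons.mp hmemrev with h | h
      · exact absurd h.symm heq
      · exact h
    have hubrest : ∀ y ∈ rest, y ≤ mx := by
      intro y hy
      have : y ∈ arr := by rw [← List.mem_reverse, hrev]; simp [hy]
      exact hub y this
    simp only [loopRev, beq_iff_eq, if_neg heq, if_neg (by omega : ¬ a0 > a0)]
    rw [loopRev_eq mx rest 1 a0 ha0lt hmemrest hubrest]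
    omega

-- ===== VERDICT (by name: the statement is the Claim_ definition above) =====
theorem solve_spec : Claim_equal_solve := by
  intro arr _ hpre
  obtain ⟨a0, rest, hrev⟩ : ∃ a0 rest, arr.reverse = a0 :: rest := by
    cases h : arr.reverse with
    | nil => exact absurd (by simpa using congrArg List.reverse h) hpre
    | cons a0 rest => exact ⟨a0, rest, rfl⟩
  show solve arr = solve_alt arr
  rw [solve_eq a0 rest arr hrev, solve_alt_eq a0 rest arr hrev]
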